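-- pv_equiv track=rewrite | github.com/laurenchen0631/interview | leetcode/python/2509_cycle_length_queries_complete_tree.py | cycleLengthQueries
-- ===== SOURCE A (Python) =====
-- def cycleLengthQueries(n: int, queries: list[list[int]]) -> list[int]:
--     ans = []
--     for p, q in queries:
--         path = 0
--         while p != q:
--             path += 1
--             if p > q:
--                 p >>= 1
--             else:
--                 q >>= 1
--         ans.append(path + 1) # to account for path between p and q
--     return ans
-- ===== SOURCE B (Python) =====
-- def cycleLengthQueries(n: int, queries: list[list[int]]) -> list[int]:
--     ans = []
--     for p, q in queries:
--         dp = p.bit_length()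
--         dq = q.bit_length()
--         d = dp - dq
--         if d > 0:
--             p >>= d        # bring the deeper node up to the shallower depth
--         else:
--             q >>= -d
--         # after alignment, each node sheds (p ^ q).bit_length() bits to reach the LCA
--         ans.append(abs(d) + 2 * (p ^ q).bit_length() + 1)
--     return ans
-- ===== Notes on version B (the rewrite author's own statement) =====
-- stated objective: faster
-- what changed: Replaces the level-by-level halving loop with a bit_length/shift/XOR closed form per query: align the deeper node by shifting it abs(dp-dq) bits, then the remaining symmetric climb is (p^q).bit_length(), giving abs(dp-dq)+2*(p^q).bit_length()+1.
import Mathlib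
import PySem

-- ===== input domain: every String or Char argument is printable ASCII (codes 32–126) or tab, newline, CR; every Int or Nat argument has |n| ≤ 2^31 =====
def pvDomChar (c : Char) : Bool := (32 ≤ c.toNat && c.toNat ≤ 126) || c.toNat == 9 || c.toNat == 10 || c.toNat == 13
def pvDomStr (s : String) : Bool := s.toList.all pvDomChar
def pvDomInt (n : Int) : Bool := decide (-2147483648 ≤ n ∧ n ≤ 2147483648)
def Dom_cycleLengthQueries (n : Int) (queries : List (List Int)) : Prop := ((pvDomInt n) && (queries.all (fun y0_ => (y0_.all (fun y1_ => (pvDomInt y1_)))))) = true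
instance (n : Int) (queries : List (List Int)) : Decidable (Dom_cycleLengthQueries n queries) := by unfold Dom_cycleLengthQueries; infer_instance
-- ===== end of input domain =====

set_option maxHeartbeats 1000000


-- B replaces A's one-bit-at-a-time halving loop by a bit_length/shift/XOR closed form per query
-- (alignment steps |dp-dq| plus 2*(p^q).bit_length() after alignment); return values proved equal on Pre_.

-- ===== PORT A =====
-- A's `while p != q` loop; fuel only makes the recursion total (it is chosen large enough
-- at the call site: each iteration strictly decreases p.natAbs + q.natAbs on Pre_ inputs).
def aLoop : Nat → Int → Int → Int → Int
  | 0, _, _, path => path + 1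
  | fuel + 1, p, q, path =>
    if p = q then path + 1
    else if q < p then aLoop fuel (p >>> 1) q (path + 1)
    else aLoop fuel p (q >>> 1) (path + 1)

def aStep (ans : List Int) (query : List Int) : List Int :=
  match query with
  | [p, q] => ans ++ [aLoop (p.natAbs + q.natAbs + 1) p q 0]
  | _ => ans ++ [0]  -- unreachable under Pre_: Python raises ValueError unpacking a non-pair

def cycleLengthQueries (n : Int) (queries : List (List Int)) : List Int :=
  queries.foldl aStep []

-- ===== PORT B =====
def bSolve (p q : Int) : Int :=
  let dp : Int := (PySem.Int.bitLength p : Int)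
  let dq : Int := (PySem.Int.bitLength q : Int)
  let d : Int := dp - dq
  let pq : Int × Int := if 0 < d then (p >>> d.toNat, q) else (p, q >>> (-d).toNat)
  (d.natAbs : Int) + 2 * (PySem.Int.bitLength (PySem.Int.bxor pq.1 pq.2) : Int) + 1

def bStep (ans : List Int) (query : List Int) : List Int :=
  match query with
  | [p, q] => ans ++ [bSolve p q]
  | _ => ans ++ [0]  -- unreachable under Pre_

def cycleLengthQueries_alt (n : Int) (queries : List (List Int)) : List Int :=
  queries.foldl bStep []

-- ===== PRECONDITION & SPEC =====
-- Pre_ excludes exactly the inputs where Python A does not return: a query that is not a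
-- 2-element list (ValueError on unpacking), and pairs p ≠ q with a negative member, on which
-- A's while-loop never terminates (the negative side gets stuck at -1 or the zero side at 0).
def pvOkPair (query : List Int) : Bool :=
  match query with
  | [p, q] => p == q || (decide (0 ≤ p) && decide (0 ≤ q))
  | _ => false

def Pre_cycleLengthQueries (n : Int) (queries : List (List Int)) : Prop :=
  ∀ query ∈ queries, pvOkPair query = true
instance (n : Int) (queries : List (List Int)) : Decidable (Pre_cycleLengthQueries n queries) := by
  unfold Pre_cycleLengthQueries; infer_instance

def pvWitness_cycleLengthQueries : Int × List (List Int) := (2, [[5, 3], [4, 7], [1, 1], [0, 6]])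

def Spec_cycleLengthQueries (n : Int) (queries : List (List Int)) (out : List Int) : Prop := out = cycleLengthQueries_alt n queries
instance (n : Int) (queries : List (List Int)) (out : List Int) : Decidable (Spec_cycleLengthQueries n queries out) := by unfold Spec_cycleLengthQueries; infer_instance

-- ===== CLAIM (what is proved, stated in full; the proofs are below) =====
def Claim_equal_cycleLengthQueries : Prop := ∀ (n : Int) (queries : List (List Int)), Dom_cycleLengthQueries n queries → Pre_cycleLengthQueries n queries → Spec_cycleLengthQueries n queries (cycleLengthQueries n queries)

-- ===== LEMMAS AND PROOFS =====

-- Nat-level model of Python's bit_length, for the arithmetic below.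
def blN (m : Nat) : Nat := if m = 0 then 0 else blN (m / 2) + 1
  decreasing_by exact Nat.div_lt_self (by omega) (by omega)

-- Nat-level model of A's loop (step count).
def stepsN (p q : Nat) : Nat :=
  if p = q then 0
  else if q < p then stepsN (p / 2) q + 1
  else stepsN p (q / 2) + 1
  termination_by p + q
  decreasing_by
  · have : p / 2 < p := Nat.div_lt_self (by omega) (by omega)
    omega
  · have : q / 2 < q := Nat.div_lt_self (by omega) (by omega)
    omega

lemma blN_zero : blN 0 = 0 := by rw [blN]; rfl

lemma blN_step {m : Nat} (h : m ≠ 0) : blN m = blN (m / 2) + 1 := by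
  conv_lhs => rw [blN]
  simp [h]

lemma stepsN_self (p : Nat) : stepsN p p = 0 := by rw [stepsN.eq_def, if_pos rfl]

lemma stepsN_gt {p q : Nat} (h1 : p ≠ q) (h2 : q < p) : stepsN p q = stepsN (p / 2) q + 1 := by
  rw [stepsN.eq_def, if_neg h1, if_pos h2]

lemma stepsN_lt {p q : Nat} (h1 : p ≠ q) (h2 : ¬ q < p) : stepsN p q = stepsN p (q / 2) + 1 := by
  rw [stepsN.eq_def, if_neg h1, if_neg h2]

lemma bitLength_eq_blN (m : Nat) : PySem.Int.bitLength (m : Int) = blN m := by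
  induction m using Nat.strong_induction_on with
  | _ m ih =>
    rcases Nat.eq_zero_or_pos m with h | h
    · subst h; rw [blN_zero]; simp [PySem.Int.bitLength_zero]
    · rw [PySem.Int.bitLength_natCast h, ih (m / 2) (Nat.div_lt_self h (by omega)),
        ← blN_step (show m ≠ 0 by omega)]

lemma blN_eq_zero {m : Nat} (h : blN m = 0) : m = 0 := by
  by_contra hm; rw [blN_step hm] at h; omega

lemma blN_lt (m : Nat) : m < 2 ^ blN m := by
  have := PySem.Int.lt_two_pow_bitLength (m : Int)
  rwa [Int.natAbs_natCast, bitLength_eq_blN] at this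

lemma blN_le {m : Nat} (h : m ≠ 0) : 2 ^ (blN m - 1) ≤ m := by
  have := PySem.Int.two_pow_bitLength_le (m : Int) (by exact_mod_cast h)
  rwa [Int.natAbs_natCast, bitLength_eq_blN] at this

lemma blN_div_two {m : Nat} (h : m ≠ 0) : blN (m / 2) = blN m - 1 := by
  rw [blN_step h]; omega

lemma xor_div_two (a b : Nat) : (a ^^^ b) / 2 = (a / 2) ^^^ (b / 2) := by
  apply Nat.eq_of_testBit_eq
  intro i
  simp [Nat.testBit_div_two, Nat.testBit_xor]

lemma lt_of_blN_lt {p q : Nat} (h : blN q < blN p) : q < p := by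
  have hp : p ≠ 0 := by intro hp; subst hp; rw [blN_zero] at h; omega
  calc q < 2 ^ blN q := blN_lt q
    _ ≤ 2 ^ (blN p - 1) := Nat.pow_le_pow_right (by omega) (by omega)
    _ ≤ p := blN_le hp

lemma half_lt_of_blN_le {p q : Nat} (hq : q ≠ 0) (h : blN p ≤ blN q) : p / 2 < q := by
  have h1 : p < 2 ^ blN p := blN_lt p
  have h2 : 2 ^ (blN q - 1) ≤ q := blN_le hq
  have hbq : blN q ≠ 0 := fun hz => hq (blN_eq_zero hz)
  have : p / 2 < 2 ^ (blN q - 1) := by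
    rw [Nat.div_lt_iff_lt_mul (by omega)]
    calc p < 2 ^ blN p := h1
      _ ≤ 2 ^ blN q := Nat.pow_le_pow_right (by omega) h
      _ = 2 ^ (blN q - 1) * 2 := by rw [← pow_succ]; congr 1; omega
  exact lt_of_lt_of_le this h2

lemma stepsN_comm_aux : ∀ (n p q : Nat), p + q ≤ n → stepsN p q = stepsN q p := by
  intro n
  induction n with
  | zero =>
    intro p q h
    have hp : p = 0 := by omega
    have hq : q = 0 := by omega
    subst hp; subst hq; rfl
  | succ n ih =>
    intro p q h
    by_cases hpq : p = q
    · subst hpq; rfl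
    · have hqp : q ≠ p := fun hh => hpq hh.symm
      by_cases hlt : q < p
      · have hp2 : p / 2 < p := Nat.div_lt_self (by omega) (by omega)
        rw [stepsN_gt hpq hlt, stepsN_lt hqp (by omega), ih (p / 2) q (by omega)]
      · have hq2 : q / 2 < q := Nat.div_lt_self (by omega) (by omega)
        rw [stepsN_lt hpq hlt, stepsN_gt hqp (by omega), ih p (q / 2) (by omega)]

lemma stepsN_comm (p q : Nat) : stepsN p q = stepsN q p :=
  stepsN_comm_aux (p + q) p q le_rfl

-- equal bit lengths ⇒ the loop runs exactly 2 * blN (p ^^^ q) steps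
lemma stepsN_eq_of_blN_eq : ∀ p q : Nat, blN p = blN q → stepsN p q = 2 * blN (p ^^^ q) := by
  intro p
  induction p using Nat.strong_induction_on with
  | _ p ih =>
    intro q hbl
    by_cases hpq : p = q
    · subst hpq; rw [stepsN_self]; simp [blN_zero]
    · -- both nonzero (blN equal and one zero would force the other zero)
      have hp0 : p ≠ 0 := by
        intro h; subst h; rw [blN_zero] at hbl
        exact hpq (blN_eq_zero hbl.symm).symm
      have hq0 : q ≠ 0 := by
        intro h; subst h; rw [blN_zero] at hbl
        exact hpq (blN_eq_zero hbl)
      have hx0 : p ^^^ q ≠ 0 := fun h => hpq (Nat.xor_eq_zero_iff.mp h)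
      have hxbl : blN (p ^^^ q) ≠ 0 := fun h => hx0 (blN_eq_zero h)
      have key : ∀ a b : Nat, a ≠ 0 → b ≠ 0 → a ≠ b → blN a = blN b → b < a →
          a / 2 < a → stepsN a b = stepsN (a / 2) (b / 2) + 2 := by
        intro a b ha hb hab hblab hlt _
        have hhalf : a / 2 < b := half_lt_of_blN_le hb (le_of_eq hblab)
        rw [stepsN_gt hab hlt, stepsN_lt (Nat.ne_of_lt hhalf) (by omega)]
      have hhalfbl : blN (p / 2) = blN (q / 2) := by
        rw [blN_div_two hp0, blN_div_two hq0, hbl]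
      have hIH : stepsN (p / 2) (q / 2) = 2 * blN ((p / 2) ^^^ (q / 2)) :=
        ih (p / 2) (Nat.div_lt_self (by omega) (by omega)) (q / 2) hhalfbl
      have hxorstep : blN ((p / 2) ^^^ (q / 2)) = blN (p ^^^ q) - 1 := by
        rw [← xor_div_two, blN_div_two hx0]
      by_cases hlt : q < p
      · rw [key p q hp0 hq0 hpq hbl hlt (Nat.div_lt_self (by omega) (by omega)),
          hIH, hxorstep]; omega
      · have hlt' : p < q := by omega
        rw [stepsN_comm, key q p hq0 hp0 (fun h => hpq h.symm) hbl.symm hlt'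
          (Nat.div_lt_self (by omega) (by omega)), stepsN_comm (q / 2) (p / 2), hIH,
          hxorstep]
        omega

-- the alignment phase: while p is deeper, A halves p, one step per level
lemma stepsN_align : ∀ k p q : Nat, blN q + k = blN p → stepsN p q = k + stepsN (p / 2 ^ k) q := by
  intro k
  induction k with
  | zero => intro p q _; simp
  | succ k ihk =>
    intro p q hbl
    have hp0 : p ≠ 0 := fun h => by subst h; rw [blN_zero] at hbl; omega
    have hlt : q < p := lt_of_blN_lt (by omega)
    rw [stepsN_gt (Ne.symm (Nat.ne_of_lt hlt)) hlt]
    have hbl2 : blN q + k = blN (p / 2) := by rw [blN_div_two hp0]; omega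
    rw [ihk (p / 2) q hbl2, Nat.div_div_eq_div_mul, ← pow_succ']
    omega

lemma blN_div_pow : ∀ k p : Nat, k ≤ blN p → blN (p / 2 ^ k) = blN p - k := by
  intro k
  induction k with
  | zero => intro p _; simp
  | succ k ihk =>
    intro p hk
    have hp0 : p ≠ 0 := fun h => by subst h; rw [blN_zero] at hk; simp at hk
    have : p / 2 ^ (k + 1) = (p / 2) / 2 ^ k := by
      rw [Nat.div_div_eq_div_mul, ← pow_succ']
    rw [this, ihk (p / 2) (by rw [blN_div_two hp0]; omega), blN_div_two hp0]
    omega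

-- A's fueled loop agrees with stepsN whenever fuel ≥ p + q (each iteration loses ≥ 1)
lemma aLoop_eq_stepsN : ∀ (fuel : Nat) (p q : Nat) (path : Int), p + q ≤ fuel →
    aLoop fuel (p : Int) (q : Int) path = path + (stepsN p q : Int) + 1 := by
  intro fuel
  induction fuel with
  | zero =>
    intro p q path h
    have hp : p = 0 := by omega
    have hq : q = 0 := by omega
    subst hp; subst hq
    rw [stepsN]; simp [aLoop]
  | succ fuel ih =>
    intro p q path h
    rw [aLoop]
    by_cases hpq : p = q
    · subst hpq; rw [stepsN_self]; simp
    · have hcast : (p : Int) ≠ (q : Int) := by exact_mod_cast hpq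
      by_cases hlt : q < p
      · have hcastlt : (q : Int) < (p : Int) := by exact_mod_cast hlt
        have hshift : ((p : Int) >>> 1) = ((p / 2 : Nat) : Int) := by
          show ((p >>> 1 : Nat) : Int) = _
          simp [Nat.shiftRight_eq_div_pow]
        rw [if_neg hcast, if_pos hcastlt, hshift,
          ih (p / 2) q (path + 1) (by have := Nat.div_le_self p 2; have : p / 2 < p := Nat.div_lt_self (by omega) (by omega); omega)]
        rw [stepsN_gt hpq hlt]
        push_cast
        ring
      · have hcastlt : ¬ ((q : Int) < (p : Int)) := by exact_mod_cast hlt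
        have hq0 : q ≠ 0 := by omega
        have hshift : ((q : Int) >>> 1) = ((q / 2 : Nat) : Int) := by
          show ((q >>> 1 : Nat) : Int) = _
          simp [Nat.shiftRight_eq_div_pow]
        rw [if_neg hcast, if_neg hcastlt, hshift,
          ih p (q / 2) (path + 1) (by have : q / 2 < q := Nat.div_lt_self (by omega) (by omega); omega)]
        rw [stepsN_lt hpq hlt]
        push_cast
        ring

lemma shift_natCast (m k : Nat) : ((m : Int) >>> k) = ((m / 2 ^ k : Nat) : Int) := by
  show ((m >>> k : Nat) : Int) = _
  rw [Nat.shiftRight_eq_div_pow]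

-- per-query agreement on admitted pairs
lemma solve_agree (p q : Int) (h : pvOkPair [p, q] = true) :
    aLoop (p.natAbs + q.natAbs + 1) p q 0 = bSolve p q := by
  simp only [pvOkPair, Bool.or_eq_true, Bool.and_eq_true, beq_iff_eq, decide_eq_true_eq] at h
  rcases h with h | ⟨hp, hq⟩
  · -- p = q (possibly negative): A's loop exits at once, B's formula collapses to 1
    subst h
    have : (p.natAbs + p.natAbs + 1) = (p.natAbs + p.natAbs) + 1 := rfl
    rw [this, aLoop]
    simp [bSolve, PySem.Int.bxor_self, PySem.Int.bitLength_zero]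
  · -- both nonnegative
    obtain ⟨P, rfl⟩ : ∃ P : Nat, p = (P : Int) := ⟨p.toNat, (Int.toNat_of_nonneg hp).symm⟩
    obtain ⟨Q, rfl⟩ : ∃ Q : Nat, q = (Q : Int) := ⟨q.toNat, (Int.toNat_of_nonneg hq).symm⟩
    simp only [Int.natAbs_natCast]
    rw [aLoop_eq_stepsN (P + Q + 1) P Q 0 (by omega)]
    simp only [bSolve, bitLength_eq_blN]
    by_cases hd : (blN Q : Int) < (blN P : Int)
    · -- p is deeper: B shifts p, A's loop first aligns p then climbs both
      have hdn : blN Q < blN P := by exact_mod_cast hd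
      set k := blN P - blN Q with hk
      have hd' : ((blN P : Int) - (blN Q : Int)) = (k : Int) := by omega
      rw [if_pos (by omega), hd']
      simp only [Int.toNat_natCast, shift_natCast, PySem.Int.bxor_natCast, bitLength_eq_blN,
        Int.natAbs_natCast]
      rw [stepsN_align k P Q (by omega),
        stepsN_eq_of_blN_eq (P / 2 ^ k) Q (by rw [blN_div_pow k P (by omega)]; omega)]
      push_cast
      ring
    · -- q at least as deep: B shifts q; if depths are equal the shift is by 0
      have hdn : blN P ≤ blN Q := by exact_mod_cast not_lt.mp hd
      set k := blN Q - blN P with hk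
      have hd' : (-((blN P : Int) - (blN Q : Int))) = (k : Int) := by omega
      rw [if_neg (by omega), hd']
      simp only [Int.toNat_natCast, shift_natCast, PySem.Int.bxor_natCast, bitLength_eq_blN]
      have habs : ((blN P : Int) - (blN Q : Int)).natAbs = k := by omega
      rw [stepsN_comm, stepsN_align k Q P (by omega),
        stepsN_eq_of_blN_eq (Q / 2 ^ k) P (by rw [blN_div_pow k Q (by omega)]; omega),
        Nat.xor_comm, habs]
      push_cast
      ring

lemma fold_agree (queries : List (List Int)) (acc : List Int)
    (h : ∀ query ∈ queries, pvOkPair query = true) :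
    queries.foldl aStep acc = queries.foldl bStep acc := by
  induction queries generalizing acc with
  | nil => rfl
  | cons query rest ih =>
    have hq := h query (List.mem_cons_self ..)
    have hrest : ∀ x ∈ rest, pvOkPair x = true := fun x hx => h x (List.mem_cons_of_mem _ hx)
    match query with
    | [p, q] =>
      simp only [List.foldl_cons, aStep, bStep]
      rw [solve_agree p q hq]
      exact ih _ hrest
    | [] => simp [pvOkPair] at hq
    | [_] => simp [pvOkPair] at hq
    | _ :: _ :: _ :: _ => simp [pvOkPair] at hq

-- ===== VERDICT (by name: the statement is the Claim_ definition above) =====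
theorem cycleLengthQueries_spec : Claim_equal_cycleLengthQueries := by
  intro n queries _ hpre
  show cycleLengthQueries n queries = cycleLengthQueries_alt n queries
  unfold cycleLengthQueries cycleLengthQueries_alt
  exact fold_agree queries [] hpre
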